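-- pv_equiv track=rewrite | github.com/SirBeaverB/NLP-2025 | scripts/extract_triples_ltp.py | merge_phrases
-- ===== SOURCE A (Python) =====
-- def merge_phrases(words, pos, target_prefix):
--     merged = []
--     indices = []
--     i = 0
--     while i < len(words):
--         if pos[i].startswith(target_prefix):
--             start = i
--             phrase = words[i]
--             i += 1
--             while i < len(words) and pos[i].startswith(target_prefix):
--                 phrase += words[i]
--                 i += 1
--             merged.append(phrase)
--             indices.append((start, i-1))
--         else:
--             merged.append(words[i])
--             indices.append((i, i))
--             i += 1
--     return merged, indices
-- ===== SOURCE B (Python) =====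
-- def merge_phrases(words, pos, target_prefix):
--     # Two-phase: first group consecutive indices by whether pos matches the
--     # prefix, then emit phrases/spans from the grouped runs.
--     flags = [p.startswith(target_prefix) for p in pos[:len(words)]]
--     runs = []
--     cur = None  # (flag, [indices]) of the run being built
--     for i, f in enumerate(flags):
--         if cur is not None and cur[0] == f:
--             cur[1].append(i)
--         else:
--             if cur is not None:
--                 runs.append(cur)
--             cur = (f, [i])
--     if cur is not None:
--         runs.append(cur)
--     merged = []
--     indices = []
--     for f, idxs in runs:
--         if f:
--             phrase = words[idxs[0]]
--             for j in idxs[1:]: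
--                 phrase += words[j]
--             merged.append(phrase)
--             indices.append((idxs[0], idxs[-1]))
--         else:
--             for j in idxs:
--                 merged.append(words[j])
--                 indices.append((j, j))
--     return merged, indices
-- ===== Notes on version B (the rewrite author's own statement) =====
-- stated objective: idiomatic
-- what changed: B replaces A's index-advancing while loop with a nested inner while by a two-phase groupby-style pipeline: it first groups consecutive indices into runs keyed by whether the POS tag matches the prefix, then emits merged phrases and spans from the runs.
import Mathlib
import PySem

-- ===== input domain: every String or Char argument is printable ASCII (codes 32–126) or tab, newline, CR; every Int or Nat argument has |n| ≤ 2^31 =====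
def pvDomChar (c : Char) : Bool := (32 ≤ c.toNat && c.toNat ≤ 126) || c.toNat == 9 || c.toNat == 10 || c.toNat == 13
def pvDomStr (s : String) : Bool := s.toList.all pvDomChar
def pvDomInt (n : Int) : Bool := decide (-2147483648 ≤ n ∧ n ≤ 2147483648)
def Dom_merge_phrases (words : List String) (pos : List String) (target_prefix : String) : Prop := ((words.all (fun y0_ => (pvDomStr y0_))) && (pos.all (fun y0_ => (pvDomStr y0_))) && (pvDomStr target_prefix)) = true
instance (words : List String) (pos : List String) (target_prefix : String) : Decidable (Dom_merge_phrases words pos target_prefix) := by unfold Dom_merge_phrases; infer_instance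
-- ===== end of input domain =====

-- B merges prefix-matching runs in two phases (group indices into runs, then emit),
-- instead of A's index-advancing while loop with a nested inner while; objective: alternative decomposition.

-- ===== PORT A =====
-- inner 'while i < len(words) and pos[i].startswith(target_prefix)' loop
-- (fuel-guarded structural recursion; fuel = len(words) always suffices, the loop advances i each step)
def mergeA_inner (words pos : List String) (tp : String) : Nat → String → Nat → String × Nat
  | 0, phrase, i => (phrase, i)
  | fuel + 1, phrase, i =>
    if i < words.length ∧ PySem.Str.startswith (PySem.List.pyGetD pos (i : Int) "") tp = true then
      mergeA_inner words pos tp fuel (phrase ++ PySem.List.pyGetD words (i : Int) "") (i + 1)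
    else
      (phrase, i)

-- outer 'while i < len(words)' loop (same fuel discipline)
def mergeA_outer (words pos : List String) (tp : String) :
    Nat → Nat → List String → List (Int × Int) → List String × List (Int × Int)
  | 0, _, merged, indices => (merged, indices)
  | fuel + 1, i, merged, indices =>
    if i < words.length then
      if PySem.Str.startswith (PySem.List.pyGetD pos (i : Int) "") tp = true then
        let p := mergeA_inner words pos tp words.length (PySem.List.pyGetD words (i : Int) "") (i + 1)
        mergeA_outer words pos tp fuel p.2 (merged ++ [p.1]) (indices ++ [((i : Int), (p.2 : Int) - 1)])
      else
        mergeA_outer words pos tp fuel (i + 1) (merged ++ [PySem.List.pyGetD words (i : Int) ""])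
          (indices ++ [((i : Int), (i : Int))])
    else
      (merged, indices)

def merge_phrases (words : List String) (pos : List String) (target_prefix : String) : List String × (List (Int × Int)) :=
  mergeA_outer words pos target_prefix words.length 0 [] []

-- ===== PORT B =====
-- flags = [p.startswith(target_prefix) for p in pos[:len(words)]]
def flagsB (words pos : List String) (tp : String) : List Bool :=
  (PySem.List.slice pos none (some (words.length : Int))).map (fun p => PySem.Str.startswith p tp)

-- one step of the run-building loop over enumerate(flags)
def buildStep (st : List (Bool × List Int) × Option (Bool × List Int)) (pr : Int × Bool) :
    List (Bool × List Int) × Option (Bool × List Int) :=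
  match st.2 with
  | some c => if c.1 == pr.2 then (st.1, some (c.1, c.2 ++ [pr.1]))
              else (st.1 ++ [c], some (pr.2, [pr.1]))
  | none => (st.1, some (pr.2, [pr.1]))

-- the grouping loop plus the final flush of cur
def buildRuns (flags : List Bool) : List (Bool × List Int) :=
  let st := (PySem.List.enumerate flags 0).foldl buildStep ([], none)
  match st.2 with
  | some c => st.1 ++ [c]
  | none => st.1

-- one step of the emitting loop over runs
def emitStep (words : List String) (acc : List String × List (Int × Int)) (r : Bool × List Int) :
    List String × List (Int × Int) :=
  if r.1 then
    let j0 : Int := PySem.List.pyGetD r.2 0 0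
    let phrase := (PySem.List.slice r.2 (some 1) none).foldl
      (fun ph j => ph ++ PySem.List.pyGetD words j "") (PySem.List.pyGetD words j0 "")
    (acc.1 ++ [phrase], acc.2 ++ [(j0, PySem.List.pyGetD r.2 (-1) 0)])
  else
    r.2.foldl (fun a j => (a.1 ++ [PySem.List.pyGetD words j ""], a.2 ++ [(j, j)])) acc

def merge_phrases_alt (words : List String) (pos : List String) (target_prefix : String) : List String × (List (Int × Int)) :=
  (buildRuns (flagsB words pos target_prefix)).foldl (emitStep words) ([], [])

-- ===== PRECONDITION & SPEC =====
-- A indexes pos[i] for every i < len(words), so it raises IndexError when pos is shorter than words.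
def Pre_merge_phrases (words : List String) (pos : List String) (target_prefix : String) : Prop :=
  words.length ≤ pos.length
instance (words : List String) (pos : List String) (target_prefix : String) : Decidable (Pre_merge_phrases words pos target_prefix) := by unfold Pre_merge_phrases; infer_instance

def pvWitness_merge_phrases : List String × List String × String := (["the", "cat", "runs"], ["DT", "NN", "VB"], "N")

def Spec_merge_phrases (words : List String) (pos : List String) (target_prefix : String) (out : List String × (List (Int × Int))) : Prop := out = merge_phrases_alt words pos target_prefix
instance (words : List String) (pos : List String) (target_prefix : String) (out : List String × (List (Int × Int))) : Decidable (Spec_merge_phrases words pos target_prefix out) := by unfold Spec_merge_phrases; infer_instance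

-- ===== CLAIM (what is proved, stated in full; the proofs are below) =====
def Claim_equal_merge_phrases : Prop := ∀ (words : List String) (pos : List String) (target_prefix : String), Dom_merge_phrases words pos target_prefix → Pre_merge_phrases words pos target_prefix → Spec_merge_phrases words pos target_prefix (merge_phrases words pos target_prefix)

-- ===== LEMMAS AND PROOFS =====

-- common reference computation: index-carrying structural recursion over the flag list
def core (words : List String) (i : Nat) : List Bool → List String × List (Int × Int)
  | [] => ([], [])
  | false :: fl =>
      let r := core words (i + 1) fl
      (PySem.List.pyGetD words (i : Int) "" :: r.1, ((i : Int), (i : Int)) :: r.2)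
  | true :: fl =>
      let m := (fl.takeWhile (· == true)).length
      let r := core words (i + 1 + m) (fl.dropWhile (· == true))
      (((PySem.List.pyRange ((i : Int) + 1) ((i : Int) + 1 + m) 1).foldl
          (fun ph j => ph ++ PySem.List.pyGetD words j "") (PySem.List.pyGetD words (i : Int) "")) :: r.1,
       ((i : Int), (i : Int) + m) :: r.2)
termination_by fl => fl.length
decreasing_by
  · simp
  · have h1 := List.length_dropWhile_le (p := fun x : Bool => x == true) (l := fl)
    simp at h1 ⊢; omega


-- structural (run-at-a-time) form of the run-building loop
def groupRuns : List (Int × Bool) → List (Bool × List Int)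
  | [] => []
  | (i, f) :: xs =>
      (f, i :: (xs.takeWhile (fun p => p.2 == f)).map (fun p => p.1)) ::
        groupRuns (xs.dropWhile (fun p => p.2 == f))
termination_by xs => xs.length
decreasing_by
  have h1 := List.length_dropWhile_le (p := fun p : Int × Bool => p.2 == f) (l := xs)
  simp at h1 ⊢; omega

def consRun (f : Bool) (idxs : List Int) : List (Bool × List Int) → List (Bool × List Int)
  | [] => [(f, idxs)]
  | (g, js) :: rest => if g == f then (f, idxs ++ js) :: rest else (f, idxs) :: (g, js) :: rest

def buildFinish (st : List (Bool × List Int) × Option (Bool × List Int)) : List (Bool × List Int) :=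
  match st.2 with
  | some c => st.1 ++ [c]
  | none => st.1

theorem consRun_groupRuns (xs : List (Int × Bool)) (f : Bool) (idxs : List Int) :
    consRun f idxs (groupRuns xs)
      = (f, idxs ++ (xs.takeWhile (fun p => p.2 == f)).map (fun p => p.1)) ::
          groupRuns (xs.dropWhile (fun p => p.2 == f)) := by
  match xs with
  | [] => simp [groupRuns, consRun]
  | (i, g) :: ys =>
    by_cases hg : g = f
    · subst hg
      rw [groupRuns]
      simp [consRun, List.takeWhile_cons, List.dropWhile_cons]
    · rw [groupRuns, consRun]
      simp [hg, Ne.symm hg, List.takeWhile_cons, List.dropWhile_cons]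
      conv_rhs => rw [groupRuns]

theorem build_loop (L : List (Int × Bool)) (runs : List (Bool × List Int)) (f : Bool) (idxs : List Int) :
    buildFinish (L.foldl buildStep (runs, some (f, idxs))) = runs ++ consRun f idxs (groupRuns L) := by
  induction L generalizing runs f idxs with
  | nil => simp [buildFinish, consRun, groupRuns]
  | cons p xs ih =>
    obtain ⟨i, g⟩ := p
    by_cases hg : f = g
    · subst hg
      have hstep : buildStep (runs, some (f, idxs)) (i, f) = (runs, some (f, idxs ++ [i])) := by
        simp [buildStep]
      rw [List.foldl_cons, hstep, ih, consRun_groupRuns, consRun_groupRuns]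
      simp [List.takeWhile_cons, List.dropWhile_cons]
    · have hstep : buildStep (runs, some (f, idxs)) (i, g) = (runs ++ [(f, idxs)], some (g, [i])) := by
        simp [buildStep, hg]
      rw [List.foldl_cons, hstep, ih, consRun_groupRuns, consRun_groupRuns]
      simp [List.takeWhile_cons, List.dropWhile_cons, hg, Ne.symm hg, consRun]
      conv_rhs => rw [groupRuns]

theorem buildRuns_eq (fl : List Bool) :
    buildRuns fl = groupRuns (PySem.List.enumerate fl 0) := by
  cases fl with
  | nil => simp [buildRuns, groupRuns, PySem.List.enumerate_nil]
  | cons b bs =>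
    unfold buildRuns
    rw [PySem.List.enumerate_cons, List.foldl_cons]
    have hstep : buildStep ([], none) ((0 : Int), b) = ([], some (b, [0])) := by
      simp [buildStep]
    rw [hstep]
    show buildFinish _ = _
    rw [build_loop, consRun_groupRuns, groupRuns]
    simp


theorem takeWhile_enumerate (fl : List Bool) (f : Bool) : ∀ (s : Int),
    (PySem.List.enumerate fl s).takeWhile (fun p => p.2 == f)
      = PySem.List.enumerate (fl.takeWhile (fun b => b == f)) s := by
  induction fl with
  | nil => intro s; simp [PySem.List.enumerate_nil]
  | cons b bs ih =>
    intro s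
    by_cases hb : b = f
    · subst hb
      rw [PySem.List.enumerate_cons]
      simp [List.takeWhile_cons, PySem.List.enumerate_cons, ih]
    · rw [PySem.List.enumerate_cons]
      simp [List.takeWhile_cons, hb, PySem.List.enumerate_nil]

theorem dropWhile_enumerate (fl : List Bool) (f : Bool) : ∀ (s : Int),
    (PySem.List.enumerate fl s).dropWhile (fun p => p.2 == f)
      = PySem.List.enumerate (fl.dropWhile (fun b => b == f)) (s + (fl.takeWhile (fun b => b == f)).length) := by
  induction fl with
  | nil => intro s; simp [PySem.List.enumerate_nil]
  | cons b bs ih =>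
    intro s
    by_cases hb : b = f
    · subst hb
      rw [PySem.List.enumerate_cons]
      rw [List.dropWhile_cons]
      simp [List.takeWhile_cons, ih]
      ring_nf
    · rw [PySem.List.enumerate_cons]
      rw [List.dropWhile_cons]
      simp [List.takeWhile_cons, hb, PySem.List.enumerate_cons]

-- peeling one index off a non-matching run is one emitted word
theorem emitStep_false_cons (words : List String) (acc : List String × List (Int × Int)) (j : Int) (js : List Int) :
    emitStep words acc (false, j :: js)
      = emitStep words (acc.1 ++ [PySem.List.pyGetD words j ""], acc.2 ++ [(j, j)]) (false, js) := by
  simp [emitStep]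


theorem emitStep_true_range (words : List String) (acc : List String × List (Int × Int)) (a : Int) (m : Nat) :
    emitStep words acc (true, PySem.List.pyRange a (a + 1 + m) 1)
      = (acc.1 ++ [(PySem.List.pyRange (a + 1) (a + 1 + m) 1).foldl
            (fun ph j => ph ++ PySem.List.pyGetD words j "") (PySem.List.pyGetD words a "")],
         acc.2 ++ [(a, a + m)]) := by
  have h1 : PySem.List.pyRange a (a + 1 + m) 1 = a :: PySem.List.pyRange (a + 1) (a + 1 + m) 1 := by
    apply PySem.List.pyRange_one_cons; omega
  have h2 : PySem.List.pyRange a (a + 1 + m) 1 = PySem.List.pyRange a (a + m) 1 ++ [a + m] := by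
    have : a + 1 + m = (a + m) + 1 := by ring
    rw [this]
    apply PySem.List.pyRange_one_succ_right; omega
  have hlast : PySem.List.pyGetD (PySem.List.pyRange a (a + 1 + m) 1) (-1) 0 = a + m := by
    rw [h2]; exact PySem.List.pyGetD_neg_one_append_singleton _ _ _
  conv_lhs => rw [emitStep, h1]
  simp only [if_pos rfl]
  rw [← h1, hlast]
  simp [PySem.List.slice_from_one, h1, PySem.List.pyGetD_zero_cons]

theorem emit_core (words : List String) : ∀ (n : Nat) (fl : List Bool), fl.length ≤ n →
    ∀ (s : Nat) (acc : List String × List (Int × Int)),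
    (groupRuns (PySem.List.enumerate fl (s : Int))).foldl (emitStep words) acc
      = (acc.1 ++ (core words s fl).1, acc.2 ++ (core words s fl).2) := by
  intro n
  induction n with
  | zero =>
    intro fl hfl s acc
    have : fl = [] := List.eq_nil_of_length_eq_zero (by omega)
    subst this
    simp [PySem.List.enumerate_nil, groupRuns, core]
  | succ n ih =>
    intro fl hfl s acc
    match fl with
    | [] => simp [PySem.List.enumerate_nil, groupRuns, core]
    | true :: bs =>
      rw [PySem.List.enumerate_cons, groupRuns, takeWhile_enumerate, dropWhile_enumerate,
        PySem.List.map_fst_enumerate]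
      rw [List.foldl_cons]
      have hcons : PySem.List.pyRange (s : Int)
            ((s : Int) + 1 + ((bs.takeWhile (fun b => b == true)).length : Int)) 1
          = (s : Int) :: PySem.List.pyRange ((s : Int) + 1)
            ((s : Int) + 1 + ((bs.takeWhile (fun b => b == true)).length : Int)) 1 := by
        apply PySem.List.pyRange_one_cons
        push_cast; omega
      rw [← hcons, emitStep_true_range]
      have hb2 : ((s : Int) + 1 + ((bs.takeWhile (fun b => b == true)).length : Int))
          = (((s + 1 + (bs.takeWhile (fun b => b == true)).length : Nat) : Int)) := by push_cast; ring
      rw [hb2, ih (bs.dropWhile (fun b => b == true))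
            (le_trans (List.length_dropWhile_le _ _) (by have h := hfl; rw [List.length_cons] at h; omega)) _ _]
      rw [core]
      simp [List.append_assoc, hb2]
    | false :: bs =>
      rw [PySem.List.enumerate_cons, groupRuns, takeWhile_enumerate, dropWhile_enumerate]
      rw [List.foldl_cons, emitStep_false_cons]
      match bs with
      | [] =>
        simp [PySem.List.enumerate_nil, groupRuns, core, emitStep]
      | true :: cs =>
        have ht : List.takeWhile (fun b => b == false) (true :: cs) = [] := by
          simp [List.takeWhile_cons]
        have hd : List.dropWhile (fun b => b == false) (true :: cs) = true :: cs := by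
          simp [List.dropWhile_cons]
        rw [ht, hd]
        simp only [PySem.List.enumerate_nil, List.map_nil, List.length_nil, Nat.cast_zero, add_zero]
        have h0 : emitStep words (acc.1 ++ [PySem.List.pyGetD words (s : Int) ""],
            acc.2 ++ [((s : Int), (s : Int))]) (false, []) = (acc.1 ++ [PySem.List.pyGetD words (s : Int) ""],
            acc.2 ++ [((s : Int), (s : Int))]) := by
          simp [emitStep]
        rw [h0]
        have hb2 : ((s : Int) + 1) = (((s + 1 : Nat) : Int)) := by push_cast; ring
        rw [hb2, ih (true :: cs) (by have h := hfl; rw [List.length_cons] at h; omega) _ _]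
        rw [core, core]
        simp [List.append_assoc]
      | false :: cs =>
        have hgr : (false, ((s : Int) + 1) ::
              (PySem.List.enumerate (cs.takeWhile (fun b => b == false)) ((s : Int) + 1 + 1)).map (fun p => p.1)) ::
              groupRuns (PySem.List.enumerate ((false :: cs).dropWhile (fun b => b == false))
                (((s : Int) + 1) + (((false :: cs).takeWhile (fun b => b == false)).length : Int)))
            = groupRuns (PySem.List.enumerate (false :: cs) ((s : Int) + 1)) := by
          rw [PySem.List.enumerate_cons, groupRuns, takeWhile_enumerate, dropWhile_enumerate]
          rw [show List.dropWhile (fun b => b == false) (false :: cs) = List.dropWhile (fun b => b == false) cs from by simp]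
          rw [show ((List.takeWhile (fun b => b == false) (false :: cs)).length : Int)
              = 1 + ((List.takeWhile (fun b => b == false) cs).length : Int) from by
            simp [List.takeWhile_cons]; push_cast; ring]
          rw [show ((s : Int) + 1 + (1 + ((List.takeWhile (fun b => b == false) cs).length : Int)))
              = ((s : Int) + 1 + 1 + ((List.takeWhile (fun b => b == false) cs).length : Int)) from by ring]
        rw [show List.takeWhile (fun b => b == false) (false :: cs) = false :: List.takeWhile (fun b => b == false) cs from by simp [List.takeWhile_cons]]
        rw [PySem.List.enumerate_cons]
        rw [show List.dropWhile (fun b => b == false) (false :: cs) = List.dropWhile (fun b => b == false) cs from by simp [List.dropWhile_cons]]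
        simp only [List.map_cons]
        rw [← List.foldl_cons (f := emitStep words)]
        have harith : ((s : Int) + 1 + ((false :: List.takeWhile (fun b => b == false) cs).length : Int))
            = (((s : Int) + 1) + (((false :: cs).takeWhile (fun b => b == false)).length : Int)) := by
          simp [List.takeWhile_cons]
        rw [harith]
        have hgr2 : (false, ((s : Int) + 1) ::
              (PySem.List.enumerate (cs.takeWhile (fun b => b == false)) ((s : Int) + 1 + 1)).map (fun p => p.1)) ::
              groupRuns (PySem.List.enumerate ((false :: cs).dropWhile (fun b => b == false))
                (((s : Int) + 1) + (((false :: cs).takeWhile (fun b => b == false)).length : Int)))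
            = groupRuns (PySem.List.enumerate (false :: cs) ((s : Int) + 1)) := hgr
        rw [show List.dropWhile (fun b => b == false) (false :: cs) = List.dropWhile (fun b => b == false) cs from by simp [List.dropWhile_cons]] at hgr2
        rw [hgr2]
        have hb2 : ((s : Int) + 1) = (((s + 1 : Nat) : Int)) := by push_cast; ring
        rw [hb2, ih (false :: cs) (by have h := hfl; rw [List.length_cons] at h; omega) _ _]
        simp [core, List.append_assoc]


theorem dropWhile_eq_drop_len {α : Type} (p : α → Bool) : ∀ (l : List α),
    l.dropWhile p = l.drop (l.takeWhile p).length := by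
  intro l
  induction l with
  | nil => simp
  | cons x xs ih =>
    by_cases hx : p x = true
    · simp [List.dropWhile_cons, List.takeWhile_cons, hx, ih]
    · simp [List.dropWhile_cons, List.takeWhile_cons, hx]

theorem flagsB_length (words pos : List String) (tp : String) (hp : words.length ≤ pos.length) :
    (flagsB words pos tp).length = words.length := by
  unfold flagsB
  rw [PySem.List.slice_to_natCast]
  simp; omega

theorem flags_drop_cons (words pos : List String) (tp : String) (hp : words.length ≤ pos.length)
    (j : Nat) (hj : j < words.length) :
    (flagsB words pos tp).drop j
      = PySem.Str.startswith (PySem.List.pyGetD pos (j : Int) "") tp :: (flagsB words pos tp).drop (j + 1) := by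
  have hlen := flagsB_length words pos tp hp
  rw [List.drop_eq_getElem_cons (by omega)]
  congr 1
  have hjp : j < pos.length := by omega
  apply Option.some.inj
  rw [← List.getElem?_eq_getElem]
  simp [flagsB, PySem.List.slice_to_natCast, List.getElem?_take, hj,
    List.getElem?_eq_getElem hjp, List.getD_eq_getElem?_getD]

set_option maxHeartbeats 1000000 in
theorem innerA_eq (words pos : List String) (tp : String) (hp : words.length ≤ pos.length) :
    ∀ (fuel : Nat) (j : Nat), words.length - j ≤ fuel → j ≤ words.length → ∀ (ph : String),
    mergeA_inner words pos tp fuel ph j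
      = ((PySem.List.pyRange (j : Int)
            ((j : Int) + ((((flagsB words pos tp).drop j).takeWhile (fun b => b == true)).length : Int)) 1).foldl
          (fun s2 jj => s2 ++ PySem.List.pyGetD words jj "") ph,
         j + (((flagsB words pos tp).drop j).takeWhile (fun b => b == true)).length) := by
  intro fuel
  induction fuel with
  | zero =>
    intro j hfuel hj ph
    have hj' : j = words.length := by omega
    have hdrop : (flagsB words pos tp).drop j = [] := by
      apply List.drop_eq_nil_of_le
      rw [flagsB_length words pos tp hp]; omega
    rw [mergeA_inner]
    simp [hdrop, PySem.List.pyRange_one_eq_nil]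
  | succ fuel ih =>
    intro j hfuel hj ph
    by_cases hcond : j < words.length ∧ PySem.Str.startswith (PySem.List.pyGetD pos (j : Int) "") tp = true
    · have hdrop := flags_drop_cons words pos tp hp j hcond.1
      rw [hdrop, hcond.2]
      rw [List.takeWhile_cons]
      simp only [show ((true : Bool) == true) = true from rfl, if_true, cond_true, List.length_cons]
      rw [mergeA_inner, if_pos hcond]
      rw [ih (j + 1) (by omega) (by omega) (ph ++ PySem.List.pyGetD words (j : Int) "")]
      have hrange : PySem.List.pyRange (j : Int)
            ((j : Int) + (((((flagsB words pos tp).drop (j + 1)).takeWhile (fun b => b == true)).length : Nat) + 1 : Nat)) 1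
          = (j : Int) :: PySem.List.pyRange ((j : Int) + 1)
            ((j : Int) + ((((flagsB words pos tp).drop (j + 1)).takeWhile (fun b => b == true)).length + 1 : Nat)) 1 := by
        apply PySem.List.pyRange_one_cons
        push_cast; omega
      rw [hrange, List.foldl_cons]
      push_cast
      ring_nf
    · rw [mergeA_inner, if_neg hcond]
      by_cases hjlt : j < words.length
      · have hflag : PySem.Str.startswith (PySem.List.pyGetD pos (j : Int) "") tp = false := by
          rcases Bool.eq_false_or_eq_true (PySem.Str.startswith (PySem.List.pyGetD pos (j : Int) "") tp) with h | h
          · exact absurd ⟨hjlt, h⟩ hcond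
          · exact h
        rw [flags_drop_cons words pos tp hp j hjlt, hflag]
        simp [List.takeWhile_cons, PySem.List.pyRange_one_eq_nil]
      · have hdrop : (flagsB words pos tp).drop j = [] := by
          apply List.drop_eq_nil_of_le
          rw [flagsB_length words pos tp hp]; omega
        simp [hdrop, PySem.List.pyRange_one_eq_nil]

set_option maxHeartbeats 1000000 in
theorem outerA_eq (words pos : List String) (tp : String) (hp : words.length ≤ pos.length) :
    ∀ (fuel : Nat) (i : Nat), words.length - i ≤ fuel → i ≤ words.length →
    ∀ (merged : List String) (indices : List (Int × Int)),
    mergeA_outer words pos tp fuel i merged indices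
      = (merged ++ (core words i ((flagsB words pos tp).drop i)).1,
         indices ++ (core words i ((flagsB words pos tp).drop i)).2) := by
  intro fuel
  induction fuel with
  | zero =>
    intro i hfuel hi merged indices
    have hdrop : (flagsB words pos tp).drop i = [] := by
      apply List.drop_eq_nil_of_le
      rw [flagsB_length words pos tp hp]; omega
    rw [mergeA_outer]
    simp [hdrop, core]
  | succ fuel ih =>
    intro i hfuel hi merged indices
    by_cases hilt : i < words.length
    · have hdrop := flags_drop_cons words pos tp hp i hilt
      by_cases hflag : PySem.Str.startswith (PySem.List.pyGetD pos (i : Int) "") tp = true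
      · rw [mergeA_outer, if_pos hilt, if_pos hflag]
        rw [innerA_eq words pos tp hp words.length (i + 1) (by omega) (by omega)]
        have hmle : (((flagsB words pos tp).drop (i + 1)).takeWhile (fun b => b == true)).length
            ≤ words.length - (i + 1) := by
          have h1 := (List.takeWhile_prefix (l := (flagsB words pos tp).drop (i + 1))
            (fun b : Bool => b == true)).length_le
          have h2 : ((flagsB words pos tp).drop (i + 1)).length = (flagsB words pos tp).length - (i + 1) :=
            List.length_drop
          rw [flagsB_length words pos tp hp] at h2
          omega
        rw [ih (i + 1 + (((flagsB words pos tp).drop (i + 1)).takeWhile (fun b => b == true)).length)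
          (by omega) (by omega)]
        rw [hdrop, hflag, core]
        have hdw : ((flagsB words pos tp).drop (i + 1)).dropWhile (fun b => b == true)
            = (flagsB words pos tp).drop
                (i + 1 + (((flagsB words pos tp).drop (i + 1)).takeWhile (fun b => b == true)).length) := by
          rw [dropWhile_eq_drop_len, List.drop_drop]
        rw [hdw]
        have e1 : ((i + 1 : Nat) : Int) = (i : Int) + 1 := by push_cast; ring
        have e2 : ((i + 1 + (((flagsB words pos tp).drop (i + 1)).takeWhile (fun b => b == true)).length : Nat) : Int) - 1
            = (i : Int) + ((((flagsB words pos tp).drop (i + 1)).takeWhile (fun b => b == true)).length : Int) := by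
          push_cast; ring
        simp only [e1, e2, Prod.mk.injEq]
        constructor <;> simp [List.append_assoc]
      · have hflagf : PySem.Str.startswith (PySem.List.pyGetD pos (i : Int) "") tp = false := by
          simpa using hflag
        rw [mergeA_outer, if_pos hilt, if_neg hflag]
        rw [ih (i + 1) (by omega) (by omega)]
        rw [hdrop, hflagf, core]
        simp [List.append_assoc]
    · have hdrop : (flagsB words pos tp).drop i = [] := by
        apply List.drop_eq_nil_of_le
        rw [flagsB_length words pos tp hp]; omega
      rw [mergeA_outer, if_neg (by omega)]
      simp [hdrop, core]

theorem B_eq_core (words pos : List String) (tp : String) :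
    merge_phrases_alt words pos tp = core words 0 (flagsB words pos tp) := by
  unfold merge_phrases_alt
  rw [buildRuns_eq]
  rw [show ((0 : Int)) = (((0 : Nat) : Int)) from by norm_num]
  rw [emit_core words (flagsB words pos tp).length _ le_rfl 0 ([], [])]
  simp

-- ===== VERDICT (by name: the statement is the Claim_ definition above) =====
theorem merge_phrases_spec : Claim_equal_merge_phrases := by
  intro words pos tp _ hpre
  unfold Spec_merge_phrases
  unfold Pre_merge_phrases at hpre
  rw [B_eq_core]
  unfold merge_phrases
  rw [outerA_eq words pos tp hpre words.length 0 (by omega) (by omega)]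
  simp
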